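-- pv_equiv track=rewrite | github.com/leoxqy/CircleSeeker | src/circleseeker/modules/splitreads_core.py | get_idx_longest_pattern
-- ===== SOURCE A (Python) =====
-- def get_idx_longest_pattern(list_group_order: list[str], list_pattern_region: list[str]) -> list[int]:
--     """Get indices of longest pattern match."""
--     len_list_group_order = len(list_group_order)
--     len_list_pattern_region = len(list_pattern_region)
--
--     list_idx_pattern: list[list[int]] = []
--     idx = 0
--     while True:
--         if idx + len_list_pattern_region > len_list_group_order:
--             break
--         idx_end = idx + len_list_pattern_region
--         if list_group_order[idx:idx_end] == list_pattern_region: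
--             list_idx_pattern.append(list(range(idx, idx_end)))
--             idx = idx_end
--         else:
--             idx += 1
--
--     list_merge_idx_pattern: list[list[int]] = []
--
--     for list_ in list_idx_pattern:
--         if len(list_merge_idx_pattern) > 0:
--             if list_merge_idx_pattern[-1][-1] + 1 == list_[0]:
--                 list_merge_idx_pattern[-1] += list_
--             else:
--                 list_merge_idx_pattern.append(list_)
--         else:
--             list_merge_idx_pattern.append(list_)
--
--     return max(list_merge_idx_pattern, key=len) if list_merge_idx_pattern else []
-- ===== SOURCE B (Python) =====
-- def get_idx_longest_pattern(list_group_order: list[str], list_pattern_region: list[str]) -> list[int]: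
--     """Get indices of longest pattern match (single pass, no intermediate index lists)."""
--     n = len(list_group_order)
--     m = len(list_pattern_region)
--     best_start = best_runs = 0
--     cur_start = cur_runs = 0
--     i = 0
--     while i + m <= n:
--         if list_group_order[i:i + m] == list_pattern_region:
--             if cur_runs == 0:
--                 cur_start = i
--             cur_runs += 1
--             i += m
--         else:
--             if cur_runs > best_runs:
--                 best_start, best_runs = cur_start, cur_runs
--             cur_runs = 0
--             i += 1
--     if cur_runs > best_runs:
--         best_start, best_runs = cur_start, cur_runs
--     return list(range(best_start, best_start + best_runs * m))
-- ===== Notes on version B (the rewrite author's own statement) =====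
-- stated objective: alternative
-- what changed: B replaces A's three-phase pipeline (collect per-match index lists, merge adjacent lists, max by length) with a single scan that tracks only four integers (current run start/count, best run start/count) and emits one range at the end, never materialising any intermediate index lists.
import Mathlib
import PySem

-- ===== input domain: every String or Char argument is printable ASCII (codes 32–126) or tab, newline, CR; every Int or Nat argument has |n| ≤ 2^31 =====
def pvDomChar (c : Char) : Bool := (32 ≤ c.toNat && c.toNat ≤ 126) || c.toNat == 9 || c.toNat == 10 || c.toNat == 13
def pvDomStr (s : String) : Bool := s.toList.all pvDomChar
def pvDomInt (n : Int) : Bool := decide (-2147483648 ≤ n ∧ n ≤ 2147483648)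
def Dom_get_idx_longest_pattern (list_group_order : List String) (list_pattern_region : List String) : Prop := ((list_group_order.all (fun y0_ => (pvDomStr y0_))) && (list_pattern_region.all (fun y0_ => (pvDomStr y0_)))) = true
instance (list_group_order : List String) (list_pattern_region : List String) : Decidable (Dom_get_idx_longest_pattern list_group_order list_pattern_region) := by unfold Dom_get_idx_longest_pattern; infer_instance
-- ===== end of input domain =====

-- B replaces A's three-phase pipeline (collect per-match index lists, merge adjacent ones, max by
-- length) with a single scan keeping four counters and emitting one range at the end (objective:
-- alternative — no intermediate index lists are materialised).

-- ===== PORT A =====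
-- the 'while True' scan of A; fuel = n+1 suffices because under Pre_ (pattern nonempty) idx grows
-- by at least 1 per iteration (on the empty pattern the Python loop does not terminate)
def pvLoopA (g p : List String) (n m : Nat) : Nat → Nat → List (List Int) → List (List Int)
  | 0, _, acc => acc
  | fuel+1, idx, acc =>
    if idx + m > n then acc
    else if PySem.List.slice g (some (idx : Int)) (some ((idx : Int) + (m : Int))) = p then
      pvLoopA g p n m fuel (idx + m) (acc ++ [PySem.List.pyRange (idx : Int) ((idx : Int) + (m : Int)) 1])
    else pvLoopA g p n m fuel (idx + 1) acc

-- one step of A's merge loop; Python's acc[-1][-1] / list_[0] can only raise on empty member lists,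
-- which never occur under Pre_ (pattern nonempty), so getLastD/headD defaults are unreachable
def pvMergeStep (acc : List (List Int)) (l : List Int) : List (List Int) :=
  if acc.length > 0 then
    if (acc.getLastD []).getLastD 0 + 1 = l.headD 0 then
      acc.dropLast ++ [(acc.getLastD []) ++ l]
    else acc ++ [l]
  else acc ++ [l]

-- max(xs, key=len): first element of maximal length (strict '<' keeps the earlier one, as Python's max does)
def pvMaxByLen (xs : List (List Int)) : List Int :=
  match xs with
  | [] => []
  | x :: rest => rest.foldl (fun best y => if best.length < y.length then y else best) x

def get_idx_longest_pattern (list_group_order : List String) (list_pattern_region : List String) : List Int :=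
  let n := list_group_order.length
  let m := list_pattern_region.length
  let list_idx_pattern := pvLoopA list_group_order list_pattern_region n m (n + 1) 0 []
  let list_merge := list_idx_pattern.foldl pvMergeStep []
  pvMaxByLen list_merge

-- ===== PORT B =====
-- B's single while loop: i, cur_start, cur_runs, best_start, best_runs; flush on mismatch and at the end
def pvLoopB (g p : List String) (n m : Nat) : Nat → Nat → Nat → Nat → Nat → Nat → Nat × Nat
  | 0, _, cs, cr, bs, br => if br < cr then (cs, cr) else (bs, br)
  | fuel+1, i, cs, cr, bs, br =>
    if i + m > n then (if br < cr then (cs, cr) else (bs, br))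
    else if PySem.List.slice g (some (i : Int)) (some ((i : Int) + (m : Int))) = p then
      pvLoopB g p n m fuel (i + m) (if cr = 0 then i else cs) (cr + 1) bs br
    else
      pvLoopB g p n m fuel (i + 1) cs 0 (if br < cr then cs else bs) (if br < cr then cr else br)

def get_idx_longest_pattern_alt (list_group_order : List String) (list_pattern_region : List String) : List Int :=
  let n := list_group_order.length
  let m := list_pattern_region.length
  let r := pvLoopB list_group_order list_pattern_region n m (n + 1) 0 0 0 0 0
  PySem.List.pyRange (r.1 : Int) ((r.1 : Int) + (r.2 : Int) * (m : Int)) 1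

-- ===== PRECONDITION & SPEC =====
-- Pre_ excludes only the empty pattern, on which Python A's while loop never advances idx and
-- diverges (B's loop diverges there too): A returns on every other input.
def Pre_get_idx_longest_pattern (list_group_order : List String) (list_pattern_region : List String) : Prop :=
  list_pattern_region ≠ []
instance (list_group_order : List String) (list_pattern_region : List String) : Decidable (Pre_get_idx_longest_pattern list_group_order list_pattern_region) := by unfold Pre_get_idx_longest_pattern; infer_instance

def pvWitness_get_idx_longest_pattern : List String × List String := (["a", "b", "a", "b", "c", "a", "b"], ["a", "b"])

def Spec_get_idx_longest_pattern (list_group_order : List String) (list_pattern_region : List String) (out : List Int) : Prop := out = get_idx_longest_pattern_alt list_group_order list_pattern_region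
instance (list_group_order : List String) (list_pattern_region : List String) (out : List Int) : Decidable (Spec_get_idx_longest_pattern list_group_order list_pattern_region out) := by unfold Spec_get_idx_longest_pattern; infer_instance

-- ===== CLAIM (what is proved, stated in full; the proofs are below) =====
def Claim_equal_get_idx_longest_pattern : Prop := ∀ (list_group_order : List String) (list_pattern_region : List String), Dom_get_idx_longest_pattern list_group_order list_pattern_region → Pre_get_idx_longest_pattern list_group_order list_pattern_region → Spec_get_idx_longest_pattern list_group_order list_pattern_region (get_idx_longest_pattern list_group_order list_pattern_region)

-- ===== LEMMAS AND PROOFS =====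

-- greedy match-start positions: both loops scan identically, so both factor through this list
def pvStarts (g p : List String) (n m : Nat) : Nat → Nat → List Nat
  | 0, _ => []
  | fuel+1, i =>
    if i + m > n then []
    else if PySem.List.slice g (some (i : Int)) (some ((i : Int) + (m : Int))) = p then
      i :: pvStarts g p n m fuel (i + m)
    else pvStarts g p n m fuel (i + 1)

-- "keep the better run" step (first maximal wins ties)
def pvBstep (b r : Nat × Nat) : Nat × Nat := if b.2 < r.2 then r else b

-- run decomposition of the start list, with a partial run (cs, cr) in progress (cr = 0: none)
def pvRunsF (m : Nat) : Nat → Nat → List Nat → List (Nat × Nat)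
  | _, 0, [] => []
  | _, 0, s :: ss => pvRunsF m s 1 ss
  | cs, cr+1, [] => [(cs, cr+1)]
  | cs, cr+1, s :: ss =>
    if s = cs + (cr+1) * m then pvRunsF m cs (cr+2) ss else (cs, cr+1) :: pvRunsF m s 1 ss

-- the contiguous index block of a run of c consecutive matches starting at s
def pvBlock (m s c : Nat) : List Int := PySem.List.pyRange (s : Int) ((s : Int) + (c : Int) * (m : Int)) 1

theorem pvStarts_ge (g p : List String) (n m : Nat) :
    ∀ fuel i s, s ∈ pvStarts g p n m fuel i → i ≤ s := by
  intro fuel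
  induction fuel with
  | zero => intro i s h; simp [pvStarts] at h
  | succ f ih =>
    intro i s h
    rw [pvStarts] at h
    split at h
    · simp at h
    · split at h
      · rcases List.mem_cons.mp h with rfl | h
        · exact le_refl _
        · exact le_trans (Nat.le_add_right i m) (ih _ _ h)
      · exact le_trans (Nat.le_succ i) (ih _ _ h)

theorem pvLoopA_eq (g p : List String) (n m : Nat) :
    ∀ fuel i acc, pvLoopA g p n m fuel i acc
      = acc ++ (pvStarts g p n m fuel i).map (fun (s : Nat) => PySem.List.pyRange (↑s : Int) ((↑s : Int) + (m : Int)) 1) := by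
  intro fuel
  induction fuel with
  | zero => intro i acc; simp [pvLoopA, pvStarts]
  | succ f ih =>
    intro i acc
    rw [pvLoopA, pvStarts]
    split
    · simp
    · split
      · rw [ih]; simp
      · rw [ih]

theorem pvLoopB_eq (g p : List String) (n m : Nat) (_hm : 1 ≤ m) :
    ∀ fuel i cs cr bs br, (cr = 0 ∨ i = cs + cr * m) →
      pvLoopB g p n m fuel i cs cr bs br
        = List.foldl pvBstep (bs, br) (pvRunsF m cs cr (pvStarts g p n m fuel i)) := by
  intro fuel
  induction fuel with
  | zero =>
    intro i cs cr bs br _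
    cases cr with
    | zero => simp [pvLoopB, pvStarts, pvRunsF]
    | succ c => simp [pvLoopB, pvStarts, pvRunsF, pvBstep]
  | succ f ih =>
    intro i cs cr bs br hinv
    rw [pvLoopB, pvStarts]
    split
    · -- loop exit: flush
      cases cr with
      | zero => simp [pvRunsF]
      | succ c => simp [pvRunsF, pvBstep]
    · split
      · -- match at i
        cases cr with
        | zero =>
          rw [if_pos rfl, ih (i + m) i (0 + 1) bs br (Or.inr (by omega))]
          simp [pvRunsF]
        | succ c =>
          rcases hinv with h0 | hi
          · exact absurd h0 (Nat.succ_ne_zero c)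
          · rw [if_neg (Nat.succ_ne_zero c), ih (i + m) cs (c + 1 + 1) bs br (Or.inr (by subst hi; ring))]
            have harm : pvRunsF m cs (c + 1) (i :: pvStarts g p n m f (i + m))
                = pvRunsF m cs (c + 1 + 1) (pvStarts g p n m f (i + m)) := by
              rw [pvRunsF, if_pos hi]
            rw [harm]
      · -- mismatch at i: flush, reset cr
        rename_i hle hne
        rw [ih (i + 1) cs 0 (if br < cr then cs else bs) (if br < cr then cr else br) (Or.inl rfl)]
        cases cr with
        | zero =>
          simp only [if_neg (by omega : ¬br < 0)]
        | succ c =>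
          rcases hinv with h0 | hi
          · exact absurd h0 (Nat.succ_ne_zero c)
          · cases hss : pvStarts g p n m f (i + 1) with
            | nil => simp [pvRunsF, pvBstep]; split_ifs <;> simp
            | cons s ss =>
              have hs : i + 1 ≤ s := pvStarts_ge g p n m f (i + 1) s (by simp [hss])
              have hne' : s ≠ cs + (c + 1) * m := by omega
              conv_rhs => rw [pvRunsF, if_neg hne']
              rw [show pvRunsF m cs 0 (s :: ss) = pvRunsF m s 1 ss from rfl]
              simp only [List.foldl_cons]
              congr 1
              simp only [pvBstep]
              split_ifs <;> rfl

theorem pvRunsF_pos (m : Nat) : ∀ ss cs cr r, r ∈ pvRunsF m cs cr ss → 1 ≤ r.2 := by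
  intro ss
  induction ss with
  | nil =>
    intro cs cr r h
    cases cr with
    | zero => simp [pvRunsF] at h
    | succ c => simp [pvRunsF] at h; subst h; simp
  | cons s ss ih =>
    intro cs cr r h
    cases cr with
    | zero => rw [pvRunsF] at h; exact ih _ _ _ h
    | succ c =>
      rw [pvRunsF] at h
      split at h
      · exact ih _ _ _ h
      · rcases List.mem_cons.mp h with rfl | h
        · simp
        · exact ih _ _ _ h

theorem pvRunsF_ne_nil (m cs cr : Nat) (ss : List Nat) (h : 1 ≤ cr) : pvRunsF m cs cr ss ≠ [] := by
  induction ss generalizing cs cr with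
  | nil => cases cr with
    | zero => omega
    | succ c => simp [pvRunsF]
  | cons s ss ih =>
    cases cr with
    | zero => omega
    | succ c =>
      rw [pvRunsF]
      split
      · exact ih cs (c + 2) (by omega)
      · simp

theorem pvBlock_one (m s : Nat) :
    PySem.List.pyRange (s : Int) ((s : Int) + (m : Int)) 1 = pvBlock m s 1 := by
  simp [pvBlock]

theorem pvBlock_length (m s c : Nat) : (pvBlock m s c).length = c * m := by
  simp [pvBlock, PySem.List.length_pyRange_one]
  omega

theorem pvBlock_append (m s c : Nat) (hm : 1 ≤ m) :
    pvBlock m s c ++ pvBlock m (s + c * m) 1 = pvBlock m s (c + 1) := by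
  simp only [pvBlock]
  have h0 : (0 : Int) ≤ (c : Int) * (m : Int) := by positivity
  have h1 : (0 : Int) ≤ (m : Int) := by positivity
  have h := (PySem.List.pyRange_one_append (s : Int) ((s : Int) + (c : Int) * (m : Int))
    ((s : Int) + ((c : Int) + 1) * (m : Int)) (by linarith) (by nlinarith)).symm
  convert h using 3
  push_cast
  ring

theorem pvBlock_head (m s c : Nat) (h : 1 ≤ c * m) : (pvBlock m s c).headD 0 = (s : Int) := by
  rw [pvBlock, PySem.List.pyRange_one_cons (by push_cast; omega)]
  exact List.headD_cons

theorem pvBlock_last (m s c : Nat) (h : 1 ≤ c * m) :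
    (pvBlock m s c).getLastD 0 = (s : Int) + (c : Int) * (m : Int) - 1 := by
  have hb : (s : Int) + (c : Int) * (m : Int) = ((s : Int) + (c : Int) * (m : Int) - 1) + 1 := by ring
  have hle : (s : Int) ≤ (s : Int) + (c : Int) * (m : Int) - 1 := by
    have : (1 : Int) ≤ (c : Int) * (m : Int) := by exact_mod_cast h
    linarith
  conv_lhs => rw [pvBlock, hb, PySem.List.pyRange_one_succ_right hle]
  exact List.getLastD_concat

theorem pvMerge_eq (m : Nat) (hm : 1 ≤ m) :
    ∀ ss acc cs cr, 1 ≤ cr →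
      List.foldl pvMergeStep (acc ++ [pvBlock m cs cr]) (ss.map (fun s => pvBlock m s 1))
        = acc ++ (pvRunsF m cs cr ss).map (fun r => pvBlock m r.1 r.2) := by
  intro ss
  induction ss with
  | nil =>
    intro acc cs cr hcr
    cases cr with
    | zero => omega
    | succ c => simp [pvRunsF]
  | cons s ss ih =>
    intro acc cs cr hcr
    have hcm : 1 ≤ cr * m := Nat.mul_pos (by omega) (by omega)
    simp only [List.map_cons, List.foldl_cons]
    have hstep : pvMergeStep (acc ++ [pvBlock m cs cr]) (pvBlock m s 1)
        = if s = cs + cr * m then acc ++ [pvBlock m cs (cr + 1)]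
          else (acc ++ [pvBlock m cs cr]) ++ [pvBlock m s 1] := by
      rw [pvMergeStep, if_pos (by simp), List.getLastD_concat,
          pvBlock_last m cs cr hcm, pvBlock_head m s 1 (by omega)]
      have hiff : ((cs : Int) + (cr : Int) * (m : Int) - 1 + 1 = (s : Int)) ↔ s = cs + cr * m := by
        rw [show (cs : Int) + (cr : Int) * (m : Int) - 1 + 1 = ((cs + cr * m : Nat) : Int) from by push_cast; ring]
        exact ⟨fun h => (Nat.cast_inj.mp h).symm, fun h => by rw [h]⟩
      by_cases hcond : s = cs + cr * m
      · rw [if_pos (hiff.mpr hcond), if_pos hcond, List.dropLast_concat, hcond,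
            pvBlock_append m cs cr hm]
      · rw [if_neg (fun hC => hcond (hiff.mp hC)), if_neg hcond]
    rw [hstep]
    by_cases hcond : s = cs + cr * m
    · rw [if_pos hcond, ih acc cs (cr + 1) (by omega)]
      cases cr with
      | zero => omega
      | succ c => rw [pvRunsF, if_pos hcond]
    · rw [if_neg hcond, ih (acc ++ [pvBlock m cs cr]) s 1 (by omega)]
      cases cr with
      | zero => omega
      | succ c => rw [pvRunsF, if_neg hcond]; simp

theorem pvMax_eq (m : Nat) (hm : 1 ≤ m) :
    ∀ rs b, List.foldl (fun best y => if best.length < y.length then y else best)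
        (pvBlock m b.1 b.2) (rs.map (fun r => pvBlock m r.1 r.2))
      = pvBlock m (List.foldl pvBstep b rs).1 (List.foldl pvBstep b rs).2 := by
  intro rs
  induction rs with
  | nil => intro b; rfl
  | cons r rs ih =>
    intro b
    simp only [List.map_cons, List.foldl_cons]
    have hcond : ((pvBlock m b.1 b.2).length < (pvBlock m r.1 r.2).length) ↔ (b.2 < r.2) := by
      rw [pvBlock_length, pvBlock_length]
      exact Nat.mul_lt_mul_right (by omega)
    have hstep : (if (pvBlock m b.1 b.2).length < (pvBlock m r.1 r.2).length
          then pvBlock m r.1 r.2 else pvBlock m b.1 b.2)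
        = pvBlock m (pvBstep b r).1 (pvBstep b r).2 := by
      rw [pvBstep]
      by_cases h : b.2 < r.2
      · rw [if_pos (hcond.mpr h), if_pos h]
      · rw [if_neg (fun hc => h (hcond.mp hc)), if_neg h]
    rw [hstep, ih]

-- ===== VERDICT (by name: the statement is the Claim_ definition above) =====
theorem get_idx_longest_pattern_spec : Claim_equal_get_idx_longest_pattern := by
  intro g p _ hpre
  have hnp : p ≠ [] := hpre
  have hm : 1 ≤ p.length := List.length_pos_of_ne_nil hnp
  show get_idx_longest_pattern g p = get_idx_longest_pattern_alt g p
  simp only [get_idx_longest_pattern, get_idx_longest_pattern_alt]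
  rw [pvLoopA_eq, pvLoopB_eq g p g.length p.length hm (g.length + 1) 0 0 0 0 0 (Or.inl rfl)]
  simp only [List.nil_append, pvBlock_one]
  cases hss : pvStarts g p g.length p.length (g.length + 1) 0 with
  | nil => simp [pvRunsF, pvMaxByLen, pvBlock, PySem.List.pyRange_one_eq_nil]
  | cons s ss =>
    rw [show pvRunsF p.length 0 0 (s :: ss) = pvRunsF p.length s 1 ss from rfl]
    simp only [List.map_cons, List.foldl_cons]
    rw [show pvMergeStep [] (pvBlock p.length s 1) = [] ++ [pvBlock p.length s 1] from by
      simp [pvMergeStep]]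
    rw [pvMerge_eq p.length hm ss [] s 1 (by omega)]
    rcases hrs : pvRunsF p.length s 1 ss with _ | ⟨r0, rs⟩
    · exact absurd hrs (pvRunsF_ne_nil p.length s 1 ss (by omega))
    · have hpos : 1 ≤ r0.2 := pvRunsF_pos p.length ss s 1 r0 (by simp [hrs])
      simp only [List.nil_append, List.map_cons, pvMaxByLen, List.foldl_cons]
      rw [pvMax_eq p.length hm rs r0]
      rw [show pvBstep (0, 0) r0 = r0 from by rw [pvBstep, if_pos (by omega : (0:Nat) < r0.2)]]
      rfl
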